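-- pv_equiv track=rewrite | github.com/furrykef/animalland | pwgen.py | process
-- ===== SOURCE A (Python) =====
-- def process(line):
--     line = line.strip()
--     tagged_line = line + '\x0D\x0F'
--     values = []
--     previous = '\0'
--     for ch in tagged_line:
--         values.append(str(ord(ch) - ord(previous)))
--         previous = ch
--     return "; {0}\nDB {1}\n".format(line, ",".join(values))
-- ===== SOURCE B (Python) =====
-- def process(line):
--     line = line.strip()
--
--     def diffs(s):
--         # divide and conquer: deltas of s = deltas of the left half (plus the
--         # boundary char) followed by deltas of the right half; halves overlap
--         # in one character so the boundary delta is produced exactly once.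
--         n = len(s)
--         if n < 2:
--             return []
--         if n == 2:
--             return [str(ord(s[1]) - ord(s[0]))]
--         m = n // 2
--         return diffs(s[:m + 1]) + diffs(s[m:])
--
--     values = diffs('\0' + line + '\x0D\x0F')
--     return "; {0}\nDB {1}\n".format(line, ",".join(values))
-- ===== Notes on version B (the rewrite author's own statement) =====
-- stated objective: alternative
-- what changed: B computes the delta list by divide and conquer on the seeded tagged string (splitting into two halves that overlap in one boundary character and concatenating), instead of A's left-to-right loop threading a prior-character accumulator.
import Mathlib
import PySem

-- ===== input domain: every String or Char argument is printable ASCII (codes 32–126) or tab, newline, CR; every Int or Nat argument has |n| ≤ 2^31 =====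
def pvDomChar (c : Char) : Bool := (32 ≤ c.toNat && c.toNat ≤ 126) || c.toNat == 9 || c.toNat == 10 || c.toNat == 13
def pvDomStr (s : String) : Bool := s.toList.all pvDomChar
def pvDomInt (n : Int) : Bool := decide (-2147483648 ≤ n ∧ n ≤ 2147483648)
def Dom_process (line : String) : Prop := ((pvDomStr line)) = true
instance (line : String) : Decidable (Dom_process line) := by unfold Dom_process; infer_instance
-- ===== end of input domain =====

-- B computes the deltas by divide and conquer over the seeded tagged string (halves
-- overlapping in one boundary char) instead of A's accumulator loop (objective: alternative).

-- ===== PORT A =====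
-- the loop: append str(ord(ch) - ord(prev-char)), then update prev-char
def process (line : String) : String :=
  let line := PySem.Str.strip line
  let tagged := line.toList ++ ['\x0D', '\x0F']
  let st := tagged.foldl
    (fun (st : List (List Char) × Char) ch =>
      (st.1 ++ [PySem.Int.toChars ((ch.toNat : Int) - (st.2.toNat : Int))], ch))
    ([], '\x00')
  String.ofList ("; ".toList ++ line.toList ++ "\n".toList ++ "DB ".toList ++
    PySem.Chars.join ",".toList st.1 ++ "\n".toList)

-- ===== PORT B =====
-- the recursive helper diffs(s): split at m = n // 2 into s[:m+1] and s[m:]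
def dandc (s : List Char) : List (List Char) :=
  if s.length < 2 then []
  else if s.length = 2 then
    [PySem.Int.toChars ((s[1]!.toNat : Int) - (s[0]!.toNat : Int))]
  else
    dandc (s.take (s.length / 2 + 1)) ++ dandc (s.drop (s.length / 2))
termination_by s.length
decreasing_by
  · simp only [List.length_take]; omega
  · simp only [List.length_drop]; omega

def process_alt (line : String) : String :=
  let line := PySem.Str.strip line
  let values := dandc ('\x00' :: line.toList ++ ['\x0D', '\x0F'])
  String.ofList ("; ".toList ++ line.toList ++ "\n".toList ++ "DB ".toList ++
    PySem.Chars.join ",".toList values ++ "\n".toList)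

-- ===== PRECONDITION & SPEC =====
def Spec_process (line : String) (out : String) : Prop := out = process_alt line
instance (line : String) (out : String) : Decidable (Spec_process line out) := by unfold Spec_process; infer_instance

-- ===== CLAIM (what is proved, stated in full; the proofs are below) =====
def Claim_equal_process : Prop := ∀ (line : String), Dom_process line → Spec_process line (process line)

-- ===== LEMMAS AND PROOFS =====

-- adjacent-pair deltas, the common characterisation of both ports
def pairsF : List Char → List (List Char)
  | a :: b :: t => PySem.Int.toChars ((b.toNat : Int) - (a.toNat : Int)) :: pairsF (b :: t)
  | _ => []

theorem fold_eq_pairs (cs : List Char) : ∀ (prev : Char) (acc : List (List Char)),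
    (cs.foldl
      (fun (st : List (List Char) × Char) ch =>
        (st.1 ++ [PySem.Int.toChars ((ch.toNat : Int) - (st.2.toNat : Int))], ch))
      (acc, prev)).1
    = acc ++ pairsF (prev :: cs) := by
  induction cs with
  | nil => intro prev acc; simp [pairsF]
  | cons c cs ih =>
    intro prev acc
    simp only [List.foldl_cons, pairsF]
    rw [ih c (acc ++ [PySem.Int.toChars ((c.toNat : Int) - (prev.toNat : Int))])]
    simp

theorem pairs_append (xs : List Char) (y : Char) (ys : List Char) :
    pairsF (xs ++ y :: ys) = pairsF (xs ++ [y]) ++ pairsF (y :: ys) := by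
  induction xs with
  | nil => simp [pairsF]
  | cons x xs ih =>
    cases xs with
    | nil => simp [pairsF]
    | cons x2 xs' =>
      simp only [List.cons_append, pairsF]
      rw [show x2 :: (xs' ++ y :: ys) = (x2 :: xs') ++ y :: ys from rfl, ih]
      simp

theorem pairs_split (s : List Char) (k : ℕ) (h1 : 1 ≤ k) (h2 : k < s.length) :
    pairsF s = pairsF (s.take (k + 1)) ++ pairsF (s.drop k) := by
  have hget := List.getElem_cons_drop (as := s) (i := k) (h := h2)
  have htake : s.take (k + 1) = s.take k ++ [s[k]] := by
    rw [List.take_succ]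
    simp [List.getElem?_eq_getElem h2]
  calc pairsF s = pairsF (s.take k ++ s.drop k) := by rw [List.take_append_drop]
    _ = pairsF (s.take k ++ s[k] :: s.drop (k + 1)) := by rw [hget]
    _ = pairsF (s.take k ++ [s[k]]) ++ pairsF (s[k] :: s.drop (k + 1)) := pairs_append ..
    _ = pairsF (s.take (k + 1)) ++ pairsF (s.drop k) := by rw [htake, hget]

theorem dandc_eq_pairs (s : List Char) : dandc s = pairsF s := by
  induction hn : s.length using Nat.strong_induction_on generalizing s with
  | _ n ih =>
    rw [dandc]
    by_cases h1 : s.length < 2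
    · match s, h1 with
      | [], _ => simp [pairsF]
      | [a], _ => simp [pairsF]
    · by_cases h2 : s.length = 2
      · match s, h2 with
        | [a, b], _ => simp [pairsF]
      · simp only [if_neg h1, if_neg h2]
        have h3 : 3 ≤ s.length := by omega
        rw [ih (s.take (s.length / 2 + 1)).length (by simp; omega) _ rfl,
            ih (s.drop (s.length / 2)).length (by simp; omega) _ rfl]
        exact (pairs_split s (s.length / 2) (by omega) (by omega)).symm

-- ===== VERDICT (by name: the statement is the Claim_ definition above) =====
theorem process_spec : Claim_equal_process := by
  intro line _
  unfold Spec_process process process_alt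
  simp only []
  rw [fold_eq_pairs, dandc_eq_pairs]
  simp
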